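-- pv_equiv track=rewrite | github.com/rasproteus/shrimpbot | listbuilder.py | scrub_piecename
-- ===== SOURCE A (Python) =====
-- def scrub_piecename(piecename):
--
--     scrub_these = " :!-'(),\"+.\t\r\n"
--
--     piecename = piecename.replace("\/","")\
--                          .split("/")[0]\
--                          .split(";")[-1]
--
--     for char in scrub_these:
--         piecename = piecename.replace(char,"")
--
--     return piecename.lower()
-- ===== SOURCE B (Python) =====
-- def scrub_piecename(piecename):
--     scrub_these = " :!-'(),\"+.\t\r\n"
--     out = []
--     i, n = 0, len(piecename)
--     while i < n:
--         c = piecename[i]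
--         if c == "\\" and i + 1 < n and piecename[i + 1] == "/":
--             i += 2  # an escaped slash "\/" is deleted outright
--             continue
--         if c == "/":
--             break  # everything from the first real slash on is discarded
--         if c == ";":
--             out = []  # restart: only the part after the last ';' counts
--         elif c not in scrub_these:
--             out.append(c)
--         i += 1
--     return "".join(out).lower()
-- ===== Notes on version B (the rewrite author's own statement) =====
-- stated objective: alternative
-- what changed: Replaces A's staged pipeline (a global two-character replace, two splits, then 13 successive one-character str.replace passes) with a single left-to-right scan that deletes escaped-slash pairs, stops at the first bare slash, resets the accumulator at each semicolon and filters scrub characters on the fly.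
import Mathlib
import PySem

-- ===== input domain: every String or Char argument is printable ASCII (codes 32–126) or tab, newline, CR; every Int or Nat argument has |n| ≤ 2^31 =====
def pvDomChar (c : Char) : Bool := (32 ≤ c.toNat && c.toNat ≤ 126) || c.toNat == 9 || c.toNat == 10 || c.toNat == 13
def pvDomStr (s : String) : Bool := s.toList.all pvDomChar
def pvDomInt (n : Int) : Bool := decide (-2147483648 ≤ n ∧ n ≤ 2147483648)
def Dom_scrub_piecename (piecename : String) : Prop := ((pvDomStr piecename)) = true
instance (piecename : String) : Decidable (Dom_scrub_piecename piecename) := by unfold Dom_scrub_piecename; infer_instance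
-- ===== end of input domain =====

-- B replaces A's staged pipeline (replace/split/split + 13 successive one-char str.replace
-- passes) with a single left-to-right scan that deletes escaped-slash pairs, stops at the
-- first bare slash, resets at each semicolon and filters scrub characters as it goes
-- (same return value; alternative decomposition).


-- ===== PORT A =====
def scrub_piecename (piecename : String) : String :=
  let scrub_these : String := " :!-'(),\"+.\t\r\n"
  let p := PySem.Str.replace piecename "\\/" ""
  let p := ((PySem.Str.split? p "/").getD []).headD ""
  let p := ((PySem.Str.split? p ";").getD []).getLastD ""
  let p := scrub_these.toList.foldl (fun s c => PySem.Str.replace s (String.ofList [c]) "") p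
  PySem.Str.lower p

-- ===== PORT B =====
-- the scrub characters B skips (Python: `c not in scrub_these`)
def scrubChars : List Char := " :!-'(),\"+.\t\r\n".toList

-- the single scan of Source B's while loop: drop escaped-slash pairs, stop at a bare slash,
-- reset at a semicolon, skip scrub chars
def scrubAltGo : List Char → List Char → List Char
  | [], acc => acc.reverse
  | '\\' :: '/' :: t, acc => scrubAltGo t acc
  | '/' :: _, acc => acc.reverse
  | ';' :: t, _ => scrubAltGo t []
  | c :: t, acc => if scrubChars.contains c then scrubAltGo t acc else scrubAltGo t (c :: acc)

def scrub_piecename_alt (piecename : String) : String :=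
  PySem.Str.lower (String.ofList (scrubAltGo piecename.toList []))

-- ===== PRECONDITION & SPEC =====
def Spec_scrub_piecename (piecename : String) (out : String) : Prop := out = scrub_piecename_alt piecename
instance (piecename : String) (out : String) : Decidable (Spec_scrub_piecename piecename out) := by unfold Spec_scrub_piecename; infer_instance

-- ===== CLAIM (what is proved, stated in full; the proofs are below) =====
def Claim_equal_scrub_piecename : Prop := ∀ (piecename : String), Dom_scrub_piecename piecename → Spec_scrub_piecename piecename (scrub_piecename piecename)

-- ===== LEMMAS AND PROOFS =====

-- ---- A's first stage: replace("\/","") removes left-to-right the non-overlapping "\/" pairs ----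
def remEsc : List Char → List Char
  | '\\' :: '/' :: t => remEsc t
  | c :: t => c :: remEsc t
  | [] => []

theorem remEsc_cons_ne (c : Char) (t : List Char) (h : c ≠ '\\') :
    remEsc (c :: t) = c :: remEsc t := by
  rw [remEsc.eq_def]; split
  · rename_i heq; cases heq; exact absurd rfl h
  · rename_i heq; cases heq; rfl
  · rename_i heq; cases heq

theorem remEsc_bs_ne (c : Char) (t : List Char) (h : c ≠ '/') :
    remEsc ('\\' :: c :: t) = '\\' :: remEsc (c :: t) := by
  rw [remEsc.eq_def]; split
  · rename_i heq; cases heq; exact absurd rfl h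
  · rename_i heq; cases heq; rfl
  · rename_i heq; cases heq

theorem remEsc_single (c : Char) : remEsc [c] = [c] := by
  rw [remEsc.eq_def]
  split
  · rename_i heq; cases heq
  · rename_i heq; cases heq; rfl
  · rename_i heq; cases heq

theorem replace_go_esc :
    ∀ (fuel : Nat) (l acc : List Char), l.length ≤ fuel →
      PySem.Chars.replace.go ['\\', '/'] [] fuel l acc = acc.reverse ++ remEsc l := by
  intro fuel
  induction fuel using Nat.strong_induction_on with
  | _ fuel ih =>
    intro l acc h
    match fuel, l with
    | 0, l =>
      have : l = [] := List.length_eq_zero_iff.mp (Nat.le_zero.mp h)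
      subst this
      simp [PySem.Chars.replace.go, remEsc]
    | (n+1), [] => simp [PySem.Chars.replace.go, remEsc]
    | (n+1), (c :: t) =>
      simp only [PySem.Chars.replace.go]
      by_cases hb : c = '\\'
      · subst hb
        cases t with
        | nil =>
          have hp : ['\\', '/'].isPrefixOf ['\\'] = false := by decide
          rw [hp]
          simp only [Bool.false_eq_true, if_false]
          rw [ih n (by omega) [] ('\\' :: acc) (by simp)]
          simp [remEsc_single, remEsc]
        | cons d t' =>
          by_cases hd : d = '/'
          · subst hd
            have hp : ['\\', '/'].isPrefixOf ('\\' :: '/' :: t') = true := by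
              simp [List.isPrefixOf]
            rw [hp]
            simp only [if_pos, List.length_cons, List.length_nil, List.drop_succ_cons,
              List.drop_zero, List.reverse_nil, List.nil_append]
            rw [ih n (by omega) t' acc (by simp at h ⊢; omega)]
            simp [remEsc]
          · have hp : ['\\', '/'].isPrefixOf ('\\' :: d :: t') = false := by
              simp [List.isPrefixOf]
              intro h'
              exact absurd h'.symm hd
            rw [hp]
            simp only [Bool.false_eq_true, if_false]
            rw [ih n (by omega) (d :: t') ('\\' :: acc) (by simp at h ⊢; omega)]
            rw [remEsc_bs_ne d t' hd]
            simp
      · have hp : ['\\', '/'].isPrefixOf (c :: t) = false := by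
          simp [List.isPrefixOf]
          intro h'
          exact absurd h'.symm hb
        rw [hp]
        simp only [Bool.false_eq_true, if_false]
        rw [ih n (by omega) t (c :: acc) (by simp at h ⊢; omega)]
        rw [remEsc_cons_ne c t hb]
        simp

theorem replace_esc (l : List Char) :
    PySem.Chars.replace l ['\\', '/'] [] = remEsc l := by
  rw [PySem.Chars.replace]
  simp only [List.isEmpty_cons, Bool.false_eq_true, if_false]
  exact replace_go_esc l.length l [] le_rfl

-- ---- A's split stages: split on a single character ----
def splitC (s : Char) : List Char → List (List Char)
  | [] => [[]]
  | c :: t => if c = s then [] :: splitC s t else (splitC s t).modifyHead (c :: ·)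

theorem splitC_ne_nil (s : Char) (l : List Char) : splitC s l ≠ [] := by
  cases l with
  | nil => simp [splitC]
  | cons c t =>
    simp only [splitC]
    split
    · simp
    · cases h : splitC s t with
      | nil => exact absurd h (splitC_ne_nil s t)
      | cons a r => simp [List.modifyHead]

theorem splitOn_go_single (s : Char) :
    ∀ (fuel : Nat) (l cur : List Char) (acc : List (List Char)), l.length ≤ fuel →
      PySem.Chars.splitOn.go [s] fuel l cur acc
        = acc.reverse ++ (splitC s l).modifyHead (cur.reverse ++ ·) := by
  intro fuel
  induction fuel with
  | zero =>
    intro l cur acc h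
    have : l = [] := List.length_eq_zero_iff.mp (Nat.le_zero.mp h)
    subst this
    simp [PySem.Chars.splitOn.go, splitC, List.modifyHead]
  | succ n ih =>
    intro l cur acc h
    cases l with
    | nil => simp [PySem.Chars.splitOn.go, splitC, List.modifyHead]
    | cons c t =>
      simp only [PySem.Chars.splitOn.go]
      by_cases hcs : c = s
      · subst hcs
        simp only [List.isPrefixOf, BEq.refl, Bool.true_and, if_pos]
        rw [ih _ _ _ (by simpa using Nat.le_of_succ_le_succ h)]
        cases hs : splitC c t <;> simp [splitC, List.modifyHead, hs]
      · have hp : [s].isPrefixOf (c :: t) = false := by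
          simp [List.isPrefixOf]; exact fun hh => absurd hh.symm hcs
        rw [hp]
        simp only [Bool.false_eq_true, if_false]
        rw [ih _ _ _ (by simpa using Nat.le_of_succ_le_succ h)]
        simp [splitC, hcs, List.modifyHead_modifyHead, Function.comp_def]

theorem splitOn_single (s : Char) (l : List Char) :
    PySem.Chars.splitOn l [s] = splitC s l := by
  rw [PySem.Chars.splitOn, splitOn_go_single s _ _ _ _ (by omega)]
  cases hs : splitC s l <;> simp [List.modifyHead, hs]

theorem headD_splitC (s : Char) (l : List Char) :
    (splitC s l).headD [] = l.takeWhile (· != s) := by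
  induction l with
  | nil => simp [splitC]
  | cons c t ih =>
    simp only [splitC, List.takeWhile]
    by_cases hcs : c = s
    · subst hcs; simp
    · have hb : (c != s) = true := by simpa using hcs
      simp only [hcs, if_false, hb]
      cases h : splitC s t with
      | nil => exact absurd h (splitC_ne_nil s t)
      | cons a r => simp [List.modifyHead, ← ih, h]

theorem splitC_of_not_mem (s : Char) (l : List Char) (h : s ∉ l) : splitC s l = [l] := by
  induction l with
  | nil => simp [splitC]
  | cons c t ih =>
    simp only [List.mem_cons, not_or] at h
    simp [splitC, Ne.symm h.1, ih h.2, List.modifyHead]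

theorem takeWhile_reverse_of_not_mem (s : Char) (m : List Char) (h : s ∉ m) :
    (m.reverse.takeWhile (· != s)).reverse = m := by
  have : m.reverse.takeWhile (· != s) = m.reverse := by
    apply List.takeWhile_eq_self_iff.mpr
    intro x hx
    simp only [bne_iff_ne, ne_eq]
    exact fun he => h (by simpa [he] using (List.mem_reverse.mp hx))
  simp [this]

theorem takeWhile_append_of_mem (s : Char) (m l : List Char) (h : s ∈ m) :
    (m ++ l).takeWhile (· != s) = m.takeWhile (· != s) := by
  rw [List.takeWhile_append]
  have : (m.takeWhile (· != s)).length ≠ m.length := by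
    intro he
    have hself : m.takeWhile (· != s) = m := (List.takeWhile_prefix _).eq_of_length he
    have := List.takeWhile_eq_self_iff.mp hself s h
    simp at this
  simp [this]

theorem splitC_length_two_le (s : Char) (t : List Char) (h : s ∈ t) :
    2 ≤ (splitC s t).length := by
  induction t with
  | nil => simp at h
  | cons c r ih =>
    simp only [splitC]
    by_cases hcs : c = s
    · have h1 := splitC_ne_nil s r
      rw [if_pos hcs]
      cases hr : splitC s r with
      | nil => exact absurd hr h1
      | cons a b => simp
    · rw [if_neg hcs]
      have hm : s ∈ r := by
        rcases List.mem_cons.mp h with h' | h'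
        · exact absurd h'.symm hcs
        · exact h'
      have := ih hm
      rw [List.length_modifyHead]
      exact this

theorem getLastD_splitC (s : Char) (l : List Char) :
    (splitC s l).getLastD [] = (l.reverse.takeWhile (· != s)).reverse := by
  induction l with
  | nil => simp [splitC]
  | cons c t ih =>
    simp only [splitC, List.reverse_cons]
    by_cases hcs : c = s
    · subst hcs
      rw [if_pos rfl, List.getLastD_cons]
      by_cases hm : c ∈ t
      · rw [takeWhile_append_of_mem c t.reverse [c] (by simpa using hm)]
        cases h : splitC c t with
        | nil => exact absurd h (splitC_ne_nil c t)
        | cons a r => rw [← h]; exact ih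
      · rw [splitC_of_not_mem c t hm]
        have h2 := takeWhile_reverse_of_not_mem c t hm
        have h3 : t.reverse.takeWhile (· != c) = t.reverse := by
          have := congrArg List.reverse h2; simpa using this
        rw [List.takeWhile_append]
        simp [h3, List.modifyHead]
    · by_cases hm : s ∈ t
      · rw [if_neg hcs, takeWhile_append_of_mem s t.reverse [c] (by simpa using hm)]
        rw [← ih]
        cases h : splitC s t with
        | nil => exact absurd h (splitC_ne_nil s t)
        | cons a r =>
          cases r with
          | nil =>
            exfalso
            have h2 := splitC_length_two_le s t hm
            rw [h] at h2; simp at h2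
          | cons b r' => simp [List.modifyHead, List.getLastD_cons]
      · rw [if_neg hcs, splitC_of_not_mem s t hm]
        have h2 := takeWhile_reverse_of_not_mem s (c :: t) (by simp [hm]; exact fun he => hcs he.symm)
        simp only [List.reverse_cons] at h2
        simp [List.modifyHead, h2]

-- string-level corollaries for A's two split stages
theorem split_headD_toList (q sep : String) (c : Char) (hs : sep.toList = [c]) :
    ((((PySem.Str.split? q sep).getD []).headD "")).toList = q.toList.takeWhile (· != c) := by
  rw [PySem.Str.split?, hs, PySem.Chars.split?]
  simp only [List.isEmpty_cons, Bool.false_eq_true, if_false, Option.map_some, Option.getD_some]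
  rw [splitOn_single]
  rw [← headD_splitC]
  cases h : splitC c q.toList with
  | nil => exact absurd h (splitC_ne_nil c q.toList)
  | cons a r => simp

theorem split_getLastD_toList (q sep : String) (c : Char) (hs : sep.toList = [c]) :
    ((((PySem.Str.split? q sep).getD []).getLastD "")).toList
      = (q.toList.reverse.takeWhile (· != c)).reverse := by
  rw [PySem.Str.split?, hs, PySem.Chars.split?]
  simp only [List.isEmpty_cons, Bool.false_eq_true, if_false, Option.map_some, Option.getD_some]
  rw [splitOn_single]
  rw [← getLastD_splitC]
  induction hl : splitC c q.toList with
  | nil => exact absurd hl (splitC_ne_nil c q.toList)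
  | cons a r ihr =>
    clear ihr hl
    induction r generalizing a with
    | nil => simp
    | cons b r' ih => simpa [List.getLastD_cons] using ih b

-- ---- A's scrub loop: folding single-char replaces filters the characters out ----
theorem replace_go_single (c : Char) :
    ∀ (fuel : Nat) (l acc : List Char), l.length ≤ fuel →
      PySem.Chars.replace.go [c] [] fuel l acc = acc.reverse ++ l.filter (fun x => x != c) := by
  intro fuel
  induction fuel with
  | zero =>
    intro l acc h
    have : l = [] := List.length_eq_zero_iff.mp (Nat.le_zero.mp h)
    subst this
    simp [PySem.Chars.replace.go]
  | succ n ih =>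
    intro l acc h
    cases l with
    | nil => simp [PySem.Chars.replace.go]
    | cons a t =>
      simp only [PySem.Chars.replace.go]
      by_cases hac : a = c
      · subst hac
        simp only [List.isPrefixOf, BEq.refl, Bool.true_and, if_pos]
        simp only [List.length_cons, List.length_nil, List.drop_succ_cons, List.drop_zero,
          List.reverse_nil, List.nil_append]
        rw [ih t acc (by simpa using Nat.le_of_succ_le_succ h)]
        simp
      · have : [c].isPrefixOf (a :: t) = false := by
          simp [List.isPrefixOf]
          exact fun hh => absurd hh.symm hac
        rw [this]
        simp only [Bool.false_eq_true, if_false]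
        rw [ih t (a :: acc) (by simpa using Nat.le_of_succ_le_succ h)]
        simp [hac]

theorem replace_single (c : Char) (l : List Char) :
    PySem.Chars.replace l [c] [] = l.filter (fun x => x != c) := by
  rw [PySem.Chars.replace]
  simp only [List.isEmpty_cons, Bool.false_eq_true, if_false]
  exact replace_go_single c l.length l [] le_rfl

theorem foldl_replace_eq_filter (cs : List Char) :
    ∀ (p : String),
      (cs.foldl (fun s c => PySem.Str.replace s (String.ofList [c]) "") p).toList
        = p.toList.filter (fun x => !(cs.contains x)) := by
  induction cs with
  | nil => intro p; simp
  | cons c cs ih =>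
    intro p
    simp only [List.foldl_cons]
    rw [ih (PySem.Str.replace p (String.ofList [c]) "")]
    rw [PySem.Str.toList_replace]
    simp only [String.toList_ofList, String.toList_empty]
    rw [replace_single]
    rw [List.filter_filter]
    apply List.filter_congr
    intro x _
    simp only [List.contains_cons]
    by_cases hxc : x = c
    · subst hxc; simp
    · have h1 : (x == c) = false := beq_eq_false_iff_ne.mpr hxc
      have h2 : (c == x) = false := beq_eq_false_iff_ne.mpr (Ne.symm hxc)
      simp [h1, bne]

-- ---- B's scanner: factored through the escape-free scan fScan ----
def fScan : List Char → List Char → List Char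
  | [], acc => acc.reverse
  | '/' :: _, acc => acc.reverse
  | ';' :: t, _ => fScan t []
  | c :: t, acc => if scrubChars.contains c then fScan t acc else fScan t (c :: acc)

theorem go_eq_fScan : ∀ (l acc : List Char), scrubAltGo l acc = fScan (remEsc l) acc := by
  intro l acc
  fun_induction scrubAltGo l acc <;> simp_all [remEsc, fScan]

theorem fScan_spec : ∀ (m acc : List Char), fScan m acc =
    if ';' ∈ m.takeWhile (· != '/')
    then (((m.takeWhile (· != '/')).reverse.takeWhile (· != ';')).reverse).filter
            (fun x => !(scrubChars.contains x))
    else acc.reverse ++ (m.takeWhile (· != '/')).filter (fun x => !(scrubChars.contains x)) := by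
  intro m acc
  fun_induction fScan m acc with
  | case1 acc => simp
  | case2 t acc => simp
  | case3 t acc ih =>
    have e1 : List.takeWhile (fun x => x != '/') (';' :: t)
        = ';' :: List.takeWhile (fun x => x != '/') t := by simp
    rw [ih, e1, List.reverse_cons]
    by_cases hm : ';' ∈ List.takeWhile (fun x => x != '/') t
    · rw [if_pos hm, if_pos (by simp : ';' ∈ ';' :: List.takeWhile (fun x => x != '/') t),
        takeWhile_append_of_mem ';' _ _ (List.mem_reverse.mpr hm)]
    · rw [if_neg hm, if_pos (by simp : ';' ∈ ';' :: List.takeWhile (fun x => x != '/') t)]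
      have h2 := takeWhile_reverse_of_not_mem ';' (List.takeWhile (fun x => x != '/') t) hm
      have h3 : (List.takeWhile (fun x => x != '/') t).reverse.takeWhile (· != ';')
          = (List.takeWhile (fun x => x != '/') t).reverse := by
        have := congrArg List.reverse h2; simpa using this
      rw [List.takeWhile_append]
      simp [h3]
  | case4 c t acc h1 h2 hc ih =>
    have hb1 : (c != '/') = true := by simpa using h1
    have hb2 : (c != ';') = true := by simpa using h2
    have e1 : List.takeWhile (fun x => x != '/') (c :: t)
        = c :: List.takeWhile (fun x => x != '/') t := by simp [hb1]
    have hmem : (';' ∈ c :: List.takeWhile (fun x => x != '/') t) ↔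
        (';' ∈ List.takeWhile (fun x => x != '/') t) := by
      simp only [List.mem_cons]
      constructor
      · rintro (h | h)
        · exact absurd h.symm (by simpa using hb2)
        · exact h
      · exact Or.inr
    rw [ih, e1]
    by_cases hm : ';' ∈ List.takeWhile (fun x => x != '/') t
    · rw [if_pos hm, if_pos (hmem.mpr hm), List.reverse_cons,
        takeWhile_append_of_mem ';' _ _ (List.mem_reverse.mpr hm)]
    · rw [if_neg hm, if_neg (fun h => hm (hmem.mp h)), List.filter_cons]
      have hcm : c ∈ scrubChars := by simpa using hc
      simp [hcm]
  | case5 c t acc h1 h2 hc ih =>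
    have hb1 : (c != '/') = true := by simpa using h1
    have hb2 : (c != ';') = true := by simpa using h2
    have e1 : List.takeWhile (fun x => x != '/') (c :: t)
        = c :: List.takeWhile (fun x => x != '/') t := by simp [hb1]
    have hmem : (';' ∈ c :: List.takeWhile (fun x => x != '/') t) ↔
        (';' ∈ List.takeWhile (fun x => x != '/') t) := by
      simp only [List.mem_cons]
      constructor
      · rintro (h | h)
        · exact absurd h.symm (by simpa using hb2)
        · exact h
      · exact Or.inr
    rw [ih, e1]
    by_cases hm : ';' ∈ List.takeWhile (fun x => x != '/') t
    · rw [if_pos hm, if_pos (hmem.mpr hm), List.reverse_cons,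
        takeWhile_append_of_mem ';' _ _ (List.mem_reverse.mpr hm)]
    · rw [if_neg hm, if_neg (fun h => hm (hmem.mp h)), List.filter_cons]
      have hcm : c ∉ scrubChars := by simpa using hc
      simp [hcm]

-- ===== VERDICT (by name: the statement is the Claim_ definition above) =====
theorem scrub_piecename_spec : Claim_equal_scrub_piecename := by
  intro piecename _
  unfold Spec_scrub_piecename scrub_piecename scrub_piecename_alt
  apply congrArg PySem.Str.lower
  apply String.ext
  rw [foldl_replace_eq_filter]
  rw [split_getLastD_toList _ ";" ';' (by decide)]
  rw [split_headD_toList _ "/" '/' (by decide)]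
  rw [PySem.Str.toList_replace]
  have hesc : ("\\/" : String).toList = ['\\', '/'] := by decide
  have hnil : ("" : String).toList = [] := by decide
  rw [hesc, hnil, replace_esc]
  rw [String.toList_ofList, go_eq_fScan, fScan_spec]
  by_cases hm : ';' ∈ (remEsc piecename.toList).takeWhile (· != '/')
  · rw [if_pos hm]
    simp [scrubChars]
  · rw [if_neg hm, takeWhile_reverse_of_not_mem ';' _ hm]
    simp [scrubChars]
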